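-- pv_equiv track=rewrite | github.com/Fmtomiozzo/AyED2025c2-Tomiozzo-oficial | Trabajopractico_2/Trabajo_6/tests/lista_de_aldea.py | enraizar_mst
-- ===== SOURCE A (Python) =====
-- from collections import defaultdict, deque        # defaultdict para listas por defecto; deque para colas eficientes
--
-- def enraizar_mst(mst, raiz):
--     g = defaultdict(list)                         # Adyacencias solo del MST
--     N = set()                                     # Conjunto de nodos presentes en el MST
--     for u, v, w in mst:
--         g[u].append((v, w)); g[v].append((u, w))  # Inserta arista en ambos sentidos
--         N.add(u); N.add(v)                        # Registra nodos
--     parent = {n: (None, 0) for n in N}            # Padre de cada nodo y peso de la arista al padre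
--     children = {n: [] for n in N}                 # Hijos (a quién reenvía) por nodo
--     if raiz in N:
--         vis = {raiz}                              # Visitados para BFS sobre el MST
--         q = deque([raiz])                         # Cola iniciada en la raíz
--         while q:
--             u = q.popleft()                       # Saca un nodo de la cola
--             for v, w in g[u]:                     # Recorre sus vecinos en el MST
--                 if v not in vis:
--                     vis.add(v)                    # Marca visitado
--                     parent[v] = (u, w)            # Define padre de v y peso de esa arista
--                     children[u].append((v, w))    # Agrega v como hijo (reenvío) de u
--                     q.append(v)                   # Encola v para seguir el recorrido
--     else:
--         N.add(raiz)                               # Si el MST está vacío, agrega la raíz sola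
--         parent[raiz] = (None, 0)                  # La raíz no tiene padre
--         children.setdefault(raiz, [])             # Asegura lista de hijos
--     for k in children:
--         children[k].sort(key=lambda x: x[0])      # Ordena hijos por nombre para salida estable
--     return parent, children, N                     # Devuelve padres, hijos y conjunto de nodos del MST
-- ===== SOURCE B (Python) =====
-- def enraizar_mst(mst, raiz):
--     # Node set only -- no adjacency structure is built.
--     N = set()
--     for u, v, w in mst:
--         N.add(u); N.add(v)
--     parent = {n: (None, 0) for n in N}
--     if raiz in N:
--         # BFS over a growing visit list with a read index; neighbours of u are
--         # found by scanning the raw edge list each time, in edge order.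
--         order = [raiz]
--         vis = {raiz}
--         i = 0
--         while i < len(order):
--             u = order[i]
--             i += 1
--             for a, b, w in mst:
--                 if a == u and b not in vis:
--                     vis.add(b); parent[b] = (u, w); order.append(b)
--                 if b == u and a not in vis:
--                     vis.add(a); parent[a] = (u, w); order.append(a)
--     else:
--         N.add(raiz)
--         parent[raiz] = (None, 0)
--     # Children of k = sorted selection of the parent map, one comprehension.
--     children = {k: sorted([(v, w) for v, (p, w) in parent.items() if p == k],
--                           key=lambda x: x[0])
--                 for k in parent}
--     return parent, children, N
-- ===== Notes on version B (the rewrite author's own statement) =====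
-- stated objective: alternative
-- what changed: B builds no adjacency dict and uses no deque: the BFS walks a growing visit list with a read index and finds each node's neighbours by scanning the raw edge list, it records only parents, and the children dict is produced afterwards by one per-node sorted comprehension over the parent map.
import Mathlib
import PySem

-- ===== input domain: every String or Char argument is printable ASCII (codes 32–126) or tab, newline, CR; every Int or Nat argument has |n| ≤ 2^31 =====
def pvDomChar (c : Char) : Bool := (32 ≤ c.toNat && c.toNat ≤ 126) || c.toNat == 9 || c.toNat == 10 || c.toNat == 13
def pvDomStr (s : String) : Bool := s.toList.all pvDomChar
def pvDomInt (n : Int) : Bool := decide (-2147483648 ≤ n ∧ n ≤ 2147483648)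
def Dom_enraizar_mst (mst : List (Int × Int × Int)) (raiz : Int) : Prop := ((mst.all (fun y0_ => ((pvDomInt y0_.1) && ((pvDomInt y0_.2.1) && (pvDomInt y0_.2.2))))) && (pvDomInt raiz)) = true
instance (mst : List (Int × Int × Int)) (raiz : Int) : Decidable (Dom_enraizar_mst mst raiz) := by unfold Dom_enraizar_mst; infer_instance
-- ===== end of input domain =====

-- B builds no adjacency dict and uses no deque: its BFS walks a growing visit list with a
-- read index, finds neighbours by scanning the raw edge list, records only parents, and the
-- children lists are produced afterwards per node from the parent map (alternative; not faster).

-- ===== PORT A =====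
-- A's first loop: MST adjacency dict and node set
def pvBuild (mst : List (Int × Int × Int)) :
    PySem.Dict Int (List (Int × Int)) × PySem.Set Int :=
  mst.foldl (fun acc e =>
      (((acc.1.modify e.1 [] (· ++ [(e.2.1, e.2.2)])).modify e.2.1 [] (· ++ [(e.1, e.2.2)])),
        PySem.Set.add (PySem.Set.add acc.2 e.1) e.2.1))
    (PySem.Dict.empty, PySem.Set.empty)

-- one neighbour step of A's BFS: state (vis, parent, children, queue)
def pvBfsStepA (u : Int)
    (st : PySem.Set Int × PySem.Dict Int (Option Int × Int) × PySem.Dict Int (List (Int × Int)) × List Int)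
    (vw : Int × Int) :
    PySem.Set Int × PySem.Dict Int (Option Int × Int) × PySem.Dict Int (List (Int × Int)) × List Int :=
  if st.1.contains vw.1 then st
  else (st.1.add vw.1, st.2.1.insert vw.1 (some u, vw.2),
        st.2.2.1.modify u [] (· ++ [(vw.1, vw.2)]), st.2.2.2 ++ [vw.1])

-- A's 'while q' loop (fuel only makes the loop total; it is never exhausted in fact)
def pvBfsA (g : PySem.Dict Int (List (Int × Int))) :
    Nat → PySem.Set Int → PySem.Dict Int (Option Int × Int) →
    PySem.Dict Int (List (Int × Int)) → List Int →
    PySem.Dict Int (Option Int × Int) × PySem.Dict Int (List (Int × Int))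
  | 0, _, parent, children, _ => (parent, children)
  | fuel + 1, vis, parent, children, q =>
    match q with
    | [] => (parent, children)
    | u :: q' =>
      let st := (g.getD u []).foldl (pvBfsStepA u) (vis, parent, children, q')
      pvBfsA g fuel st.1 st.2.1 st.2.2.1 st.2.2.2

def enraizar_mst (mst : List (Int × Int × Int)) (raiz : Int) :
    (List (Int × Option Int × Int)) × (List (Int × List (Int × Int))) × List Int :=
  let acc := pvBuild mst
  let g := acc.1
  let N := acc.2
  let parent0 : PySem.Dict Int (Option Int × Int) :=
    PySem.Dict.mk (N.map (fun n => (n, ((none : Option Int), (0 : Int)))))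
  let children0 : PySem.Dict Int (List (Int × Int)) :=
    PySem.Dict.mk (N.map (fun n => (n, ([] : List (Int × Int)))))
  if N.contains raiz then
    let r := pvBfsA g (2 * mst.length + 1) (PySem.Set.add PySem.Set.empty raiz) parent0 children0 [raiz]
    (r.1.items,
     r.2.items.map (fun kv => (kv.1, PySem.List.sorted kv.2 (fun x => x.1) false)),
     N)
  else
    let parent1 := parent0.insert raiz ((none : Option Int), (0 : Int))
    let children1 := children0.setdefault raiz []
    (parent1.items,
     children1.items.map (fun kv => (kv.1, PySem.List.sorted kv.2 (fun x => x.1) false)),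
     PySem.Set.add N raiz)

-- ===== PORT B =====
-- Source B's comprehension '[(v, w) for v, (p, w) in parent.items() if p == k]'
def pvSel (L : List (Int × Option Int × Int)) (c : Int) : List (Int × Int) :=
  L.filterMap (fun e => if e.2.1 = some c then some (e.1, e.2.2) else none)

-- the two 'if' statements of Source B's edge scan, for one edge e and the current node u
def pvScanStep (u : Int)
    (st : PySem.Set Int × PySem.Dict Int (Option Int × Int) × List Int)
    (e : Int × Int × Int) :
    PySem.Set Int × PySem.Dict Int (Option Int × Int) × List Int :=
  let st1 := if e.1 = u ∧ ¬ st.1.contains e.2.1 then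
      (st.1.add e.2.1, st.2.1.insert e.2.1 (some u, e.2.2), st.2.2 ++ [e.2.1]) else st
  if e.2.1 = u ∧ ¬ st1.1.contains e.1 then
      (st1.1.add e.1, st1.2.1.insert e.1 (some u, e.2.2), st1.2.2 ++ [e.1]) else st1

-- Source B's 'while i < len(order)' loop: state (vis, parent, order), read index i
-- (fuel only makes the loop total; it is never exhausted in fact)
def pvBfsB (mst : List (Int × Int × Int)) :
    Nat → PySem.Set Int → PySem.Dict Int (Option Int × Int) → List Int → Nat →
    PySem.Dict Int (Option Int × Int)
  | 0, _, parent, _, _ => parent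
  | fuel + 1, vis, parent, order, i =>
    match order[i]? with
    | none => parent
    | some u =>
      let st := mst.foldl (pvScanStep u) (vis, parent, order)
      pvBfsB mst fuel st.1 st.2.1 st.2.2 (i + 1)

def enraizar_mst_alt (mst : List (Int × Int × Int)) (raiz : Int) :
    (List (Int × Option Int × Int)) × (List (Int × List (Int × Int))) × List Int :=
  -- node set only; no adjacency structure
  let N : PySem.Set Int :=
    mst.foldl (fun s e => PySem.Set.add (PySem.Set.add s e.1) e.2.1) PySem.Set.empty
  let parent0 : PySem.Dict Int (Option Int × Int) :=
    PySem.Dict.mk (N.map (fun n => (n, ((none : Option Int), (0 : Int)))))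
  let parent :=
    if N.contains raiz then
      pvBfsB mst (2 * mst.length + 1) (PySem.Set.add PySem.Set.empty raiz) parent0 [raiz] 0
    else parent0.insert raiz ((none : Option Int), (0 : Int))
  let N' := if N.contains raiz then N else PySem.Set.add N raiz
  -- dict comprehension over parent's (distinct) keys: its items are exactly this map
  let children := parent.keys.map
    (fun k => (k, PySem.List.sorted (pvSel parent.items k) (fun x => x.1) false))
  (parent.items, children, N')

-- ===== PRECONDITION & SPEC =====
def Spec_enraizar_mst (mst : List (Int × Int × Int)) (raiz : Int) (out : (List (Int × Option Int × Int)) × (List (Int × List (Int × Int))) × List Int) : Prop := out = enraizar_mst_alt mst raiz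
instance (mst : List (Int × Int × Int)) (raiz : Int) (out : (List (Int × Option Int × Int)) × (List (Int × List (Int × Int))) × List Int) : Decidable (Spec_enraizar_mst mst raiz out) := by unfold Spec_enraizar_mst; infer_instance

-- ===== CLAIM (what is proved, stated in full; the proofs are below) =====
def Claim_equal_enraizar_mst : Prop := ∀ (mst : List (Int × Int × Int)) (raiz : Int), Dom_enraizar_mst mst raiz → Spec_enraizar_mst mst raiz (enraizar_mst mst raiz)

-- ===== LEMMAS AND PROOFS =====

-- proof-only: the neighbour list of u that Source B's edge scan visits, in scan order
def pvNbrsOf (e : Int × Int × Int) (u : Int) : List (Int × Int) :=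
  (if e.1 = u then [(e.2.1, e.2.2)] else []) ++ (if e.2.1 = u then [(e.1, e.2.2)] else [])

def pvNbrs (l : List (Int × Int × Int)) (u : Int) : List (Int × Int) :=
  l.flatMap (fun e => pvNbrsOf e u)

-- proof-only: one neighbour step of B's BFS (the body shared by both ifs of pvScanStep)
def pvSingleStep (u : Int)
    (st : PySem.Set Int × PySem.Dict Int (Option Int × Int) × List Int)
    (vw : Int × Int) :
    PySem.Set Int × PySem.Dict Int (Option Int × Int) × List Int :=
  if st.1.contains vw.1 then st
  else (st.1.add vw.1, st.2.1.insert vw.1 (some u, vw.2), st.2.2 ++ [vw.1])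

-- the coupled invariant of the two BFS loops (on A's full state)
def pvInv (N : List Int) (vis : PySem.Set Int)
    (parent : PySem.Dict Int (Option Int × Int))
    (children : PySem.Dict Int (List (Int × Int))) (q : List Int) : Prop :=
  parent.keys = N ∧ children.keys = N ∧
  (∀ x ∈ N, x ∉ vis → parent.get? x = some (none, 0)) ∧
  (∀ c, (children.getD c []).Perm (pvSel parent.items c)) ∧
  (∀ x ∈ q, x ∈ N) ∧
  (∀ e ∈ parent.items, ∀ p, e.2.1 = some p → p ∈ N)

lemma pvBuild_props (mst : List (Int × Int × Int)) :
    (pvBuild mst).2.Nodup ∧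
    (∀ u : Int, ∀ p ∈ (pvBuild mst).1.getD u [], p.1 ∈ (pvBuild mst).2) := by
  have main : ∀ (l : List (Int × Int × Int))
      (st : PySem.Dict Int (List (Int × Int)) × PySem.Set Int),
      st.2.Nodup → (∀ u : Int, ∀ p ∈ st.1.getD u [], p.1 ∈ st.2) →
      (l.foldl (fun acc e =>
        (((acc.1.modify e.1 [] (· ++ [(e.2.1, e.2.2)])).modify e.2.1 [] (· ++ [(e.1, e.2.2)])),
          PySem.Set.add (PySem.Set.add acc.2 e.1) e.2.1)) st).2.Nodup ∧
      (∀ u : Int, ∀ p ∈ (l.foldl (fun acc e =>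
        (((acc.1.modify e.1 [] (· ++ [(e.2.1, e.2.2)])).modify e.2.1 [] (· ++ [(e.1, e.2.2)])),
          PySem.Set.add (PySem.Set.add acc.2 e.1) e.2.1)) st).1.getD u [],
        p.1 ∈ (l.foldl (fun acc e =>
        (((acc.1.modify e.1 [] (· ++ [(e.2.1, e.2.2)])).modify e.2.1 [] (· ++ [(e.1, e.2.2)])),
          PySem.Set.add (PySem.Set.add acc.2 e.1) e.2.1)) st).2) := by
    intro l
    induction l with
    | nil => intro st h1 h2; exact ⟨h1, h2⟩
    | cons e t ih =>
      intro st h1 h2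
      simp only [List.foldl_cons]
      apply ih
      · exact PySem.Set.nodup_add _ _ (PySem.Set.nodup_add _ _ h1)
      · intro u p hp
        simp only [PySem.Dict.getD_modify] at hp
        have hsub : ∀ x : Int, x ∈ st.2 → x ∈ PySem.Set.add (PySem.Set.add st.2 e.1) e.2.1 := by
          intro x hx
          rw [PySem.Set.mem_add, PySem.Set.mem_add]
          exact Or.inl (Or.inl hx)
        split at hp
        · rcases List.mem_append.mp hp with hp | hp
          · split at hp
            · rcases List.mem_append.mp hp with hp | hp
              · exact hsub _ (h2 _ _ hp)
              · simp at hp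
                subst hp
                simp [PySem.Set.mem_add]
            · exact hsub _ (h2 _ _ hp)
          · simp at hp
            subst hp
            simp [PySem.Set.mem_add]
        · split at hp
          · rcases List.mem_append.mp hp with hp | hp
            · exact hsub _ (h2 _ _ hp)
            · simp at hp
              subst hp
              simp [PySem.Set.mem_add]
          · exact hsub _ (h2 _ _ hp)
  exact main mst (PySem.Dict.empty, PySem.Set.empty) (by simp [PySem.Set.empty])
    (by intro u p hp; simp [PySem.Dict.getD_empty] at hp)

-- B's node-set fold equals the set component of A's combined building fold
lemma pvNodes_eq (mst : List (Int × Int × Int)) :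
    mst.foldl (fun s e => PySem.Set.add (PySem.Set.add s e.1) e.2.1) PySem.Set.empty
      = (pvBuild mst).2 := by
  have main : ∀ (l : List (Int × Int × Int))
      (st : PySem.Dict Int (List (Int × Int)) × PySem.Set Int),
      (l.foldl (fun acc e =>
        (((acc.1.modify e.1 [] (· ++ [(e.2.1, e.2.2)])).modify e.2.1 [] (· ++ [(e.1, e.2.2)])),
          PySem.Set.add (PySem.Set.add acc.2 e.1) e.2.1)) st).2
      = l.foldl (fun s e => PySem.Set.add (PySem.Set.add s e.1) e.2.1) st.2 := by
    intro l
    induction l with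
    | nil => intro st; rfl
    | cons e t ih => intro st; simp only [List.foldl_cons]; exact ih _
  exact (main mst (PySem.Dict.empty, PySem.Set.empty)).symm

-- the adjacency list A stores for u is exactly the neighbour list B's scan visits
lemma pvBuild_getD (mst : List (Int × Int × Int)) (u : Int) :
    (pvBuild mst).1.getD u [] = pvNbrs mst u := by
  have main : ∀ (l : List (Int × Int × Int))
      (st : PySem.Dict Int (List (Int × Int)) × PySem.Set Int),
      (l.foldl (fun acc e =>
        (((acc.1.modify e.1 [] (· ++ [(e.2.1, e.2.2)])).modify e.2.1 [] (· ++ [(e.1, e.2.2)])),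
          PySem.Set.add (PySem.Set.add acc.2 e.1) e.2.1)) st).1.getD u []
      = st.1.getD u [] ++ pvNbrs l u := by
    intro l
    induction l with
    | nil => intro st; simp [pvNbrs]
    | cons e t ih =>
      intro st
      simp only [List.foldl_cons]
      rw [ih]
      have hstep : ((st.1.modify e.1 [] (· ++ [(e.2.1, e.2.2)])).modify e.2.1
            [] (· ++ [(e.1, e.2.2)])).getD u []
          = st.1.getD u [] ++ pvNbrsOf e u := by
        rw [PySem.Dict.getD_modify, PySem.Dict.getD_modify, PySem.Dict.getD_modify]
        unfold pvNbrsOf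
        by_cases h1 : u = e.1 <;> by_cases h2 : u = e.2.1
        · have h3 : e.2.1 = e.1 := by rw [← h2, h1]
          simp [h1.symm, h2.symm]
        · have h3 : ¬ e.2.1 = u := fun h => h2 h.symm
          simp [h1.symm, h2, h3]
        · have h3 : ¬ e.2.1 = e.1 := fun h => h1 (h2.trans h)
          simp [h2.symm, h1, Ne.symm h1]
        · simp [h1, h2, Ne.symm h1, Ne.symm h2]
      rw [hstep, List.append_assoc]
      simp [pvNbrs]
  unfold pvBuild
  rw [main mst (PySem.Dict.empty, PySem.Set.empty)]
  simp [PySem.Dict.getD_empty]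

-- Source B's two-if edge step is the fold of the single neighbour step over pvNbrsOf
lemma pvScanStep_eq (u : Int)
    (st : PySem.Set Int × PySem.Dict Int (Option Int × Int) × List Int)
    (e : Int × Int × Int) :
    pvScanStep u st e = (pvNbrsOf e u).foldl (pvSingleStep u) st := by
  unfold pvScanStep pvNbrsOf pvSingleStep
  by_cases h1 : e.1 = u <;> by_cases h2 : e.2.1 = u <;>
    simp [h1, h2]

lemma pvScan_fold (u : Int) (l : List (Int × Int × Int)) :
    ∀ st, l.foldl (pvScanStep u) st = (pvNbrs l u).foldl (pvSingleStep u) st := by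
  induction l with
  | nil => intro st; rfl
  | cons e t ih =>
    intro st
    simp only [List.foldl_cons, pvNbrs, List.flatMap_cons, List.foldl_append]
    rw [pvScanStep_eq]
    exact ih _

lemma pvMk_get? {ν : Type} (N : List Int) (hN : N.Nodup) (v : ν) {x : Int} (hx : x ∈ N) :
    (PySem.Dict.mk (N.map (fun n => (n, v)))).get? x = some v := by
  apply PySem.Dict.get?_of_mem_items
  · exact List.mem_map.mpr ⟨x, hx, rfl⟩
  · simpa [PySem.Dict.keys_mk, List.map_map, Function.comp_def] using hN

lemma pvMk_getD_nil (N : List Int) (hN : N.Nodup) (c : Int) :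
    (PySem.Dict.mk (N.map (fun n => (n, ([] : List (Int × Int)))))).getD c [] = [] := by
  by_cases hc : c ∈ N
  · rw [PySem.Dict.getD_eq_get?_getD, pvMk_get? N hN _ hc]
    rfl
  · apply PySem.Dict.getD_of_not_contains
    rw [Bool.eq_false_iff]
    intro hcon
    rw [PySem.Dict.contains_iff_mem_keys] at hcon
    simp [PySem.Dict.keys_mk, List.map_map, Function.comp_def] at hcon
    exact hc hcon

lemma pvSel_none (L : List (Int × Option Int × Int)) (c : Int)
    (h : ∀ e ∈ L, e.2.1 = none) : pvSel L c = [] := by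
  unfold pvSel
  rw [List.filterMap_eq_nil_iff]
  intro e he
  simp [h e he]

lemma pvSel_fst_sublist (L : List (Int × Option Int × Int)) (c : Int) :
    ((pvSel L c).map (fun p => p.1)).Sublist (L.map (fun e => e.1)) := by
  induction L with
  | nil => simp [pvSel]
  | cons e t ih =>
    simp only [pvSel] at ih ⊢
    by_cases h : e.2.1 = some c
    · simp [h]
      exact ih
    · simp only [List.filterMap_cons, List.map_cons]
      simp [h]
      exact ih.cons _

lemma pvSorted_eq_of_perm (l1 l2 : List (Int × Int)) (h : l1.Perm l2)
    (hnd : (l2.map (fun p => p.1)).Nodup) :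
    PySem.List.sorted l1 (fun x => x.1) false = PySem.List.sorted l2 (fun x => x.1) false := by
  apply PySem.List.sorted_eq_of_perm_of_pairwise_lt
  · exact ((PySem.List.sorted_perm l2 (fun x => x.1) false).trans h.symm)
  · have hperm : (PySem.List.sorted l2 (fun x => x.1) false).Perm l2 :=
      PySem.List.sorted_perm l2 (fun x => x.1) false
    have hnd' : ((PySem.List.sorted l2 (fun x => x.1) false).map (fun p => p.1)).Nodup :=
      (hperm.map (fun p => p.1)).nodup_iff.mpr hnd
    have hle : (PySem.List.sorted l2 (fun x => x.1) false).Pairwise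
        (fun a b => a.1 ≤ b.1) := PySem.List.sorted_pairwise l2 (fun x => x.1)
    have hne : (PySem.List.sorted l2 (fun x => x.1) false).Pairwise
        (fun a b => a.1 ≠ b.1) := by
      simp only [List.Nodup, List.pairwise_map] at hnd'
      exact hnd'
    exact (hle.and hne).imp (fun h => lt_of_le_of_ne h.1 h.2)

lemma pvSel_map_update (L : List (Int × Option Int × Int)) (v u w c : Int)
    (hv : ∀ e ∈ L, e.1 = v → e.2.1 = none)
    (hnd : (L.map (fun e => e.1)).Nodup) :
    (v ∈ L.map (fun e => e.1) →
      (pvSel (L.map (fun p => if p.1 == v then (v, (some u, w)) else p)) c).Perm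
        (pvSel L c ++ if c = u then [(v, w)] else [])) ∧
    (v ∉ L.map (fun e => e.1) →
      pvSel (L.map (fun p => if p.1 == v then (v, (some u, w)) else p)) c = pvSel L c) := by
  induction L with
  | nil =>
    constructor
    · intro h; simp at h
    · intro _; rfl
  | cons e t ih =>
    have hne : e.1 ∉ t.map (fun e => e.1) := (List.nodup_cons.mp hnd).1
    have hnd' : (t.map (fun e => e.1)).Nodup := (List.nodup_cons.mp hnd).2
    have hv' : ∀ e' ∈ t, e'.1 = v → e'.2.1 = none :=
      fun e' h' => hv e' (List.mem_cons_of_mem _ h')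
    obtain ⟨ih1, ih2⟩ := ih hv' hnd'
    by_cases hev : e.1 = v
    · have hvt : v ∉ t.map (fun e => e.1) := by rw [← hev]; exact hne
      have htmap : t.map (fun p => if p.1 == v then (v, (some u, w)) else p) = t := by
        have hcon : ∀ p ∈ t, (if p.1 == v then (v, (some u, w)) else p) = p := by
          intro p hp
          rw [if_neg]
          simp only [beq_iff_eq]
          intro hpe
          exact hvt (List.mem_map.mpr ⟨p, hp, hpe⟩)
        simpa using List.map_congr_left hcon
      constructor
      · intro _
        have he2 : e.2.1 = none := hv e (List.mem_cons_self) hev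
        have hupd : ((fun p => if (p.1 == v) = true then (v, (some u, w)) else p) e)
            = (v, (some u, w)) := by simp [hev]
        simp only [List.map_cons, htmap, hupd]
        by_cases hcu : c = u
        · subst hcu
          simp [pvSel, he2]
          exact (List.perm_append_singleton _ _).symm
        · simp [pvSel, he2, hcu, Ne.symm hcu]
      · intro h
        exact absurd (by simp [hev]) h
    · have hhd : (if e.1 == v then (v, (some u, w)) else e) = e := by
        rw [if_neg]; simpa [beq_iff_eq] using hev
      constructor
      · intro hmem
        have hvt : v ∈ t.map (fun e => e.1) := by
          simp only [List.map_cons, List.mem_cons] at hmem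
          rcases hmem with h | h
          · exact absurd h.symm hev
          · exact h
        simp only [List.map_cons, hhd, pvSel, List.filterMap_cons]
        simp only [pvSel] at ih1
        by_cases hec : e.2.1 = some c
        · simp only [if_pos hec, List.cons_append]
          exact (ih1 hvt).cons _
        · simp only [if_neg hec]
          exact ih1 hvt
      · intro hmem
        have hvt : v ∉ t.map (fun e => e.1) := by
          intro h; exact hmem (by simp at h ⊢; rcases h with ⟨a, ha, he⟩; exact Or.inr ⟨a, ha, he⟩)
        simp only [List.map_cons, hhd, pvSel, List.filterMap_cons]
        simp only [pvSel] at ih2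
        rw [ih2 hvt]

lemma pvInv_step (N : List Int) (hN : N.Nodup) (u : Int) (hu : u ∈ N)
    (v w : Int) (hv : v ∈ N)
    (vis : PySem.Set Int) (parent : PySem.Dict Int (Option Int × Int))
    (children : PySem.Dict Int (List (Int × Int))) (q : List Int)
    (hInv : pvInv N vis parent children q) (hvis : v ∉ vis) :
    pvInv N (vis.add v) (parent.insert v (some u, w))
      (children.modify u [] (· ++ [(v, w)])) (q ++ [v]) := by
  obtain ⟨h1, h2, h3, h4, h5, h7⟩ := hInv
  have hndk : parent.keys.Nodup := by rw [h1]; exact hN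
  have hvk : v ∈ parent.keys := by rw [h1]; exact hv
  have hcv : parent.contains v = true := (PySem.Dict.contains_iff_mem_keys _ _).mpr hvk
  have hcu : children.contains u = true :=
    (PySem.Dict.contains_iff_mem_keys _ _).mpr (by rw [h2]; exact hu)
  have hgv : parent.get? v = some (none, 0) := h3 v hv hvis
  have hitems : (parent.insert v (some u, w)).items
      = parent.items.map (fun p => if p.1 == v then (v, (some u, w)) else p) :=
    PySem.Dict.items_insert_of_contains _ _ hcv
  have hmapkeys : parent.items.map (fun e => e.1) = parent.keys := by
    simp [PySem.Dict.keys]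
  have hventries : ∀ e ∈ parent.items, e.1 = v → e.2.1 = none := by
    intro e he hev
    have hmem : (v, e.2) ∈ parent.items := by
      have hee : e = (v, e.2) := by rw [← hev]
      rwa [← hee]
    have hgot := PySem.Dict.get?_of_mem_items _ hmem hndk
    rw [hgv] at hgot
    have he2 : e.2 = ((none : Option Int), (0 : Int)) := by
      exact (Option.some.injEq _ _).mp hgot.symm
    rw [he2]
  refine ⟨?_, ?_, ?_, ?_, ?_, ?_⟩
  · rw [PySem.Dict.keys_insert_of_contains _ _ hcv]; exact h1
  · rw [PySem.Dict.keys_modify, PySem.Dict.keys_insert_of_contains _ _ hcu]; exact h2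
  · intro x hx hxn
    rw [PySem.Set.mem_add] at hxn
    push Not at hxn
    rw [PySem.Dict.get?_insert_of_ne _ _ hxn.2]
    exact h3 x hx hxn.1
  · intro c
    have hperm := (pvSel_map_update parent.items v u w c hventries
        (by rw [hmapkeys]; exact hndk)).1 (by rw [hmapkeys]; exact hvk)
    rw [PySem.Dict.getD_modify, hitems]
    by_cases hcu' : c = u
    · subst hcu'
      rw [if_pos rfl]
      refine ((h4 c).append (List.Perm.refl [(v, w)])).trans ?_
      have := hperm.symm
      rw [if_pos rfl] at this
      exact this
    · rw [if_neg hcu']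
      refine (h4 c).trans ?_
      have := hperm.symm
      rw [if_neg hcu', List.append_nil] at this
      exact this
  · intro x hx
    rcases List.mem_append.mp hx with hx | hx
    · exact h5 x hx
    · simp at hx; rw [hx]; exact hv
  · intro e he p hp
    rcases (PySem.Dict.mem_items_insert _ _ _ _).mp he with he | ⟨he, _⟩
    · rw [he] at hp
      simp at hp
      rw [← hp]; exact hu
    · exact h7 e he p hp

-- coupling of the two inner folds: equal vis and parent, and the SAME suffix δ is
-- appended to A's queue tail and to B's visit list
lemma pvFold_couple (N : List Int) (hN : N.Nodup) (u : Int) (hu : u ∈ N) :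
    ∀ (l : List (Int × Int)), (∀ p ∈ l, p.1 ∈ N) →
    ∀ vis parent children qA qB, pvInv N vis parent children qA →
    (l.foldl (pvBfsStepA u) (vis, parent, children, qA)).1 = (l.foldl (pvSingleStep u) (vis, parent, qB)).1 ∧
    (l.foldl (pvBfsStepA u) (vis, parent, children, qA)).2.1 = (l.foldl (pvSingleStep u) (vis, parent, qB)).2.1 ∧
    (∃ δ, (l.foldl (pvBfsStepA u) (vis, parent, children, qA)).2.2.2 = qA ++ δ ∧
          (l.foldl (pvSingleStep u) (vis, parent, qB)).2.2 = qB ++ δ) ∧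
    pvInv N (l.foldl (pvBfsStepA u) (vis, parent, children, qA)).1
      (l.foldl (pvBfsStepA u) (vis, parent, children, qA)).2.1
      (l.foldl (pvBfsStepA u) (vis, parent, children, qA)).2.2.1
      (l.foldl (pvBfsStepA u) (vis, parent, children, qA)).2.2.2 := by
  intro l
  induction l with
  | nil =>
    intro _ vis parent children qA qB hInv
    exact ⟨rfl, rfl, ⟨[], by simp, by simp⟩, hInv⟩
  | cons e t ih =>
    intro hl vis parent children qA qB hInv
    have hl' : ∀ p ∈ t, p.1 ∈ N := fun p hp => hl p (List.mem_cons_of_mem _ hp)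
    cases hvc : vis.contains e.1 with
    | true =>
      have hmem : e.1 ∈ vis := by simp [PySem.Set.contains] at hvc; exact hvc
      have hstepA : pvBfsStepA u (vis, parent, children, qA) e = (vis, parent, children, qA) := by
        simp [pvBfsStepA, hmem]
      have hstepB : pvSingleStep u (vis, parent, qB) e = (vis, parent, qB) := by
        simp [pvSingleStep, hmem]
      simp only [List.foldl_cons, hstepA, hstepB]
      exact ih hl' vis parent children qA qB hInv
    | false =>
      have hv1 : e.1 ∈ N := hl e (List.mem_cons_self)
      have hvnot : e.1 ∉ vis := by simp [PySem.Set.contains] at hvc; exact hvc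
      have hstepA : pvBfsStepA u (vis, parent, children, qA) e
          = (vis.add e.1, parent.insert e.1 (some u, e.2),
             children.modify u [] (· ++ [(e.1, e.2)]), qA ++ [e.1]) := by
        simp [pvBfsStepA, hvnot]
      have hstepB : pvSingleStep u (vis, parent, qB) e
          = (vis.add e.1, parent.insert e.1 (some u, e.2), qB ++ [e.1]) := by
        simp [pvSingleStep, hvnot]
      simp only [List.foldl_cons, hstepA, hstepB]
      obtain ⟨c1, c2, ⟨δ, hδA, hδB⟩, hInv'⟩ := ih hl' _ _ _ _ (qB ++ [e.1])
        (pvInv_step N hN u hu e.1 e.2 hv1 vis parent children qA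
          ⟨hInv.1, hInv.2.1, hInv.2.2.1, hInv.2.2.2.1, hInv.2.2.2.2.1, hInv.2.2.2.2.2⟩ hvnot)
      refine ⟨c1, c2, ⟨e.1 :: δ, ?_, ?_⟩, hInv'⟩
      · rw [hδA, List.append_assoc]; rfl
      · rw [hδB, List.append_assoc]; rfl

-- coupling of the two BFS loops, lockstep in fuel: A's queue is B's order-from-index-i
lemma pvBfs_couple (mst : List (Int × Int × Int)) (N : List Int)
    (hN : N.Nodup)
    (hg : ∀ u : Int, ∀ p ∈ pvNbrs mst u, p.1 ∈ N) :
    ∀ fuel ord (i : Nat) vis parent children, i ≤ ord.length →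
    pvInv N vis parent children (ord.drop i) →
    (pvBfsA (pvBuild mst).1 fuel vis parent children (ord.drop i)).1 = pvBfsB mst fuel vis parent ord i ∧
    (pvBfsA (pvBuild mst).1 fuel vis parent children (ord.drop i)).1.keys = N ∧
    (pvBfsA (pvBuild mst).1 fuel vis parent children (ord.drop i)).2.keys = N ∧
    (∀ c, ((pvBfsA (pvBuild mst).1 fuel vis parent children (ord.drop i)).2.getD c []).Perm
        (pvSel (pvBfsA (pvBuild mst).1 fuel vis parent children (ord.drop i)).1.items c)) := by
  intro fuel
  induction fuel with
  | zero =>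
    intro ord i vis parent children hi hInv
    exact ⟨rfl, hInv.1, hInv.2.1, hInv.2.2.2.1⟩
  | succ fuel ih =>
    intro ord i vis parent children hi hInv
    cases hdrop : ord.drop i with
    | nil =>
      have hge : ord.length ≤ i := by
        have := congrArg List.length hdrop
        simp [List.length_drop] at this
        omega
      have hget : ord[i]? = none := List.getElem?_eq_none hge
      refine ⟨?_, hInv.1, hInv.2.1, hInv.2.2.2.1⟩
      simp only [pvBfsA, pvBfsB, hget]
    | cons u q'' =>
      obtain ⟨h1, h2, h3, h4, h5, h7⟩ := hInv
      have hlt : i < ord.length := by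
        by_contra hge
        have h0 : ord.drop i = [] := List.drop_eq_nil_of_le (by omega)
        rw [h0] at hdrop
        exact List.cons_ne_nil u q'' hdrop.symm
      have hget : ord[i]? = some u := by
        have h0 : (ord.drop i)[0]? = some u := by rw [hdrop]; rfl
        rw [List.getElem?_drop] at h0
        simpa using h0
      have hq'' : ord.drop (i + 1) = q'' := by
        have h0 : List.drop 1 (ord.drop i) = List.drop 1 (u :: q'') := by rw [hdrop]
        rw [List.drop_drop] at h0
        simpa [Nat.add_comm] using h0
      have hu : u ∈ N := h5 u (by rw [hdrop]; exact List.mem_cons_self)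
      have hq''mem : ∀ x ∈ q'', x ∈ N := fun x hx => h5 x (by rw [hdrop]; exact List.mem_cons_of_mem _ hx)
      obtain ⟨c1, c2, ⟨δ, hδA, hδB⟩, hInv2⟩ :=
        pvFold_couple N hN u hu ((pvBuild mst).1.getD u [])
          (by rw [pvBuild_getD]; exact hg u) vis parent children q'' ord
          ⟨h1, h2, h3, h4, hq''mem, h7⟩
      simp only [pvBfsA, pvBfsB, hget]
      rw [pvScan_fold, ← pvBuild_getD mst u, ← c1, ← c2]
      have hdrop' : (((pvBuild mst).1.getD u []).foldl (pvSingleStep u) (vis, parent, ord)).2.2.drop (i + 1)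
          = (((pvBuild mst).1.getD u []).foldl (pvBfsStepA u) (vis, parent, children, q'')).2.2.2 := by
        rw [hδB, hδA, List.drop_append_of_le_length (by omega), hq'']
      have hlen : i + 1 ≤ (((pvBuild mst).1.getD u []).foldl (pvSingleStep u) (vis, parent, ord)).2.2.length := by
        rw [hδB]
        simp
        omega
      have hmain := ih (((pvBuild mst).1.getD u []).foldl (pvSingleStep u) (vis, parent, ord)).2.2 (i + 1)
          (((pvBuild mst).1.getD u []).foldl (pvBfsStepA u) (vis, parent, children, q'')).1
          (((pvBuild mst).1.getD u []).foldl (pvBfsStepA u) (vis, parent, children, q'')).2.1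
          (((pvBuild mst).1.getD u []).foldl (pvBfsStepA u) (vis, parent, children, q'')).2.2.1
          hlen (by rw [hdrop']; exact hInv2)
      rw [hdrop'] at hmain
      exact hmain

-- A's final children rendering equals B's per-key selection rendering
lemma pvFinal (P : PySem.Dict Int (Option Int × Int)) (CA : PySem.Dict Int (List (Int × Int)))
    (N : List Int) (hN : N.Nodup) (hkP : P.keys = N) (hkC : CA.keys = N)
    (hperm : ∀ c, (CA.getD c []).Perm (pvSel P.items c)) :
    CA.items.map (fun kv => (kv.1, PySem.List.sorted kv.2 (fun x => x.1) false))
      = P.keys.map (fun k => (k, PySem.List.sorted (pvSel P.items k) (fun x => x.1) false)) := by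
  rw [PySem.Dict.items_eq_map_keys CA (by rw [hkC]; exact hN) []]
  rw [hkC, hkP, List.map_map]
  apply List.map_congr_left
  intro k _
  simp only [Function.comp_def]
  have hnd2 : ((pvSel P.items k).map (fun p => p.1)).Nodup := by
    have hmk : P.items.map (fun e => e.1) = P.keys := by simp [PySem.Dict.keys]
    exact List.Nodup.sublist (pvSel_fst_sublist P.items k) (by rw [hmk, hkP]; exact hN)
  rw [pvSorted_eq_of_perm _ _ (hperm k) hnd2]

-- ===== VERDICT (by name: the statement is the Claim_ definition above) =====
theorem enraizar_mst_spec : Claim_equal_enraizar_mst := by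
  intro mst raiz _
  unfold Spec_enraizar_mst
  obtain ⟨hN, hgD⟩ := pvBuild_props mst
  have hg : ∀ u : Int, ∀ p ∈ pvNbrs mst u, p.1 ∈ (pvBuild mst).2 := by
    intro u p hp
    exact hgD u p (by rw [pvBuild_getD]; exact hp)
  simp only [enraizar_mst, enraizar_mst_alt, pvNodes_eq]
  by_cases hc : (pvBuild mst).2.contains raiz = true
  · -- BFS branch
    simp only [hc, if_true]
    have hrz : raiz ∈ (pvBuild mst).2 := by simpa [PySem.Set.contains] using hc
    have hinv0 : pvInv (pvBuild mst).2 (PySem.Set.empty.add raiz)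
        (PySem.Dict.mk ((pvBuild mst).2.map (fun n => (n, ((none : Option Int), (0 : Int))))))
        (PySem.Dict.mk ((pvBuild mst).2.map (fun n => (n, ([] : List (Int × Int)))))) ([raiz].drop 0) := by
      refine ⟨?_, ?_, ?_, ?_, ?_, ?_⟩
      · simp [PySem.Dict.keys_mk, List.map_map, Function.comp_def]
      · simp [PySem.Dict.keys_mk, List.map_map, Function.comp_def]
      · intro x hx _
        exact pvMk_get? _ hN _ hx
      · intro c
        rw [pvMk_getD_nil _ hN c]
        have hsel : pvSel ((pvBuild mst).2.map (fun n => (n, ((none : Option Int), (0 : Int))))) c = [] := by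
          apply pvSel_none
          intro e he
          rcases List.mem_map.mp he with ⟨n, _, hn⟩
          rw [← hn]
        rw [hsel]
      · intro x hx
        simp at hx
        rw [hx]; exact hrz
      · intro e he p hp
        rcases List.mem_map.mp he with ⟨n, _, hn⟩
        rw [← hn] at hp
        simp at hp
    obtain ⟨e1, ekP, ekC, hperm⟩ :=
      pvBfs_couple mst (pvBuild mst).2 hN hg (2 * mst.length + 1) [raiz] 0
        (PySem.Set.empty.add raiz)
        (PySem.Dict.mk ((pvBuild mst).2.map (fun n => (n, ((none : Option Int), (0 : Int))))))
        (PySem.Dict.mk ((pvBuild mst).2.map (fun n => (n, ([] : List (Int × Int)))))) (by simp) hinv0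
    simp only [List.drop_zero] at e1 ekP ekC hperm
    rw [← e1]
    refine Prod.ext rfl (Prod.ext ?_ rfl)
    have := pvFinal _ _ (pvBuild mst).2 hN ekP ekC hperm
    rw [this, ekP]
  · -- empty-MST branch
    simp only [hc, if_false, Bool.false_eq_true]
    have hraiz : raiz ∉ (pvBuild mst).2 := by simpa [PySem.Set.contains] using hc
    have hkeys0 : (PySem.Dict.mk ((pvBuild mst).2.map
        (fun n => (n, ((none : Option Int), (0 : Int)))))).keys = (pvBuild mst).2 := by
      simp [PySem.Dict.keys_mk, List.map_map, Function.comp_def]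
    have hkeysC : (PySem.Dict.mk ((pvBuild mst).2.map
        (fun n => (n, ([] : List (Int × Int)))))).keys = (pvBuild mst).2 := by
      simp [PySem.Dict.keys_mk, List.map_map, Function.comp_def]
    have hpc : (PySem.Dict.mk ((pvBuild mst).2.map
        (fun n => (n, ((none : Option Int), (0 : Int)))))).contains raiz = false := by
      rw [Bool.eq_false_iff]; intro h
      exact hraiz (by rw [← hkeys0]; exact (PySem.Dict.contains_iff_mem_keys _ _).mp h)
    have hcc : (PySem.Dict.mk ((pvBuild mst).2.map
        (fun n => (n, ([] : List (Int × Int)))))).contains raiz = false := by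
      rw [Bool.eq_false_iff]; intro h
      exact hraiz (by rw [← hkeysC]; exact (PySem.Dict.contains_iff_mem_keys _ _).mp h)
    have hP1items := PySem.Dict.items_insert_of_not_contains
      (PySem.Dict.mk ((pvBuild mst).2.map (fun n => (n, ((none : Option Int), (0 : Int))))))
      ((none : Option Int), (0 : Int)) hpc
    have hP1keys : ((PySem.Dict.mk ((pvBuild mst).2.map
        (fun n => (n, ((none : Option Int), (0 : Int)))))).insert raiz
          ((none : Option Int), (0 : Int))).keys = (pvBuild mst).2 ++ [raiz] := by
      rw [PySem.Dict.keys_insert_of_not_contains _ _ hpc, hkeys0]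
    have hnone : ∀ e ∈ ((PySem.Dict.mk ((pvBuild mst).2.map
        (fun n => (n, ((none : Option Int), (0 : Int)))))).insert raiz
          ((none : Option Int), (0 : Int))).items, e.2.1 = none := by
      rw [hP1items]
      intro e he
      rcases List.mem_append.mp he with he | he
      · rcases List.mem_map.mp he with ⟨n, _, hn⟩
        rw [← hn]
      · simp at he
        rw [he]
    refine Prod.ext rfl (Prod.ext ?_ rfl)
    rw [PySem.Dict.setdefault_of_not_contains _ _ hcc,
        PySem.Dict.items_insert_of_not_contains _ _ hcc, hP1keys]
    have hselnil : ∀ k, pvSel (((PySem.Dict.mk ((pvBuild mst).2.map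
        (fun n => (n, ((none : Option Int), (0 : Int)))))).insert raiz
          ((none : Option Int), (0 : Int))).items) k = [] :=
      fun k => pvSel_none _ k hnone
    simp [List.map_append, hselnil, List.map_map, Function.comp_def]
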